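-- pv_equiv track=rewrite | github.com/papibe/advent-of-code-2024 | python/day12/part2.py | are_neighbors
-- ===== SOURCE A (Python) =====
-- from collections import deque, namedtuple
--
-- Point = namedtuple("Point", ["row", "col"])
--
-- def are_neighbors(edge1: Point, edge2: Point) -> bool:
--     """determine if to edges (points) are neighbors"""
--     (row1, col1) = edge1
--     (row2, col2) = edge2
--     for step_row, step_col in [(0, 1), (0, -1), (1, 0), (-1, 0)]:
--         new_row = row1 + step_row
--         new_col = col1 + step_col
--         if (new_row, new_col) == (row2, col2):
--             return True
--
--     return False
-- ===== SOURCE B (Python) =====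
-- def are_neighbors(edge1, edge2) -> bool:
--     """determine if to edges (points) are neighbors"""
--     (row1, col1) = edge1
--     (row2, col2) = edge2
--     dr = row2 - row1
--     dc = col2 - col1
--     return (abs(dr) == 1 and dc == 0) or (dr == 0 and abs(dc) == 1)
-- ===== Notes on version B (the rewrite author's own statement) =====
-- stated objective: idiomatic
-- what changed: Replaces the 4-direction loop with a direct closed-form test on the coordinate deltas (per-axis |delta| check).
import Mathlib
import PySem

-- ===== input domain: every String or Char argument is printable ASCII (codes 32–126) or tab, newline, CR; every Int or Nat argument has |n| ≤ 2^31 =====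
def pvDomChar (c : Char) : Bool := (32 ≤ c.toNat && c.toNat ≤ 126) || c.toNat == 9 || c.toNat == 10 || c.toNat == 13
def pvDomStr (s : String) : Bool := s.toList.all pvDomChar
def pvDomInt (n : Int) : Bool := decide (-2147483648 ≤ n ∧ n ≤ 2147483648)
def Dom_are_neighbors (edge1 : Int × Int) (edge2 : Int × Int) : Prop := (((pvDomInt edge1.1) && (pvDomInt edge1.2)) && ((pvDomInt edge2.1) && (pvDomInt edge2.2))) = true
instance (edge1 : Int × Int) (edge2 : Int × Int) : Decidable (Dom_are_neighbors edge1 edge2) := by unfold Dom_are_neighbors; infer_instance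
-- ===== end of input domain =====

-- B replaces A's 4-direction loop by a single closed-form test on the coordinate deltas (idiomatic, same cost).

-- ===== PORT A =====
-- A scans the direction list, returning true on the first match (early return modelled as List.any).
def are_neighbors (edge1 : Int × Int) (edge2 : Int × Int) : Bool :=
  let row1 := edge1.1; let col1 := edge1.2
  let row2 := edge2.1; let col2 := edge2.2
  [((0:Int),(1:Int)), (0,-1), (1,0), (-1,0)].any (fun s =>
    let new_row := row1 + s.1
    let new_col := col1 + s.2
    (new_row, new_col) = (row2, col2))

-- ===== PORT B =====
def are_neighbors_alt (edge1 : Int × Int) (edge2 : Int × Int) : Bool :=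
  let dr := edge2.1 - edge1.1
  let dc := edge2.2 - edge1.2
  (dr.natAbs = 1 && dc = 0) || (dr = 0 && dc.natAbs = 1)

-- ===== PRECONDITION & SPEC =====
def Spec_are_neighbors (edge1 : Int × Int) (edge2 : Int × Int) (out : Bool) : Prop := out = are_neighbors_alt edge1 edge2
instance (edge1 : Int × Int) (edge2 : Int × Int) (out : Bool) : Decidable (Spec_are_neighbors edge1 edge2 out) := by unfold Spec_are_neighbors; infer_instance

-- ===== CLAIM (what is proved, stated in full; the proofs are below) =====
def Claim_equal_are_neighbors : Prop := ∀ (edge1 : Int × Int) (edge2 : Int × Int), Dom_are_neighbors edge1 edge2 → Spec_are_neighbors edge1 edge2 (are_neighbors edge1 edge2)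

-- ===== LEMMAS AND PROOFS =====

-- ===== VERDICT (by name: the statement is the Claim_ definition above) =====
theorem are_neighbors_spec : Claim_equal_are_neighbors := by
  intro ⟨r1, c1⟩ ⟨r2, c2⟩ _
  unfold Spec_are_neighbors are_neighbors are_neighbors_alt
  rw [Bool.eq_iff_iff]
  simp only [List.any, Bool.or_eq_true, Bool.and_eq_true, decide_eq_true_eq,
    Prod.mk.injEq, Bool.false_eq_true, or_false]
  omega
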